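-- pv_equiv track=rewrite | github.com/limsukjing/review-classification | utility.py | remove_pos_tags
-- ===== SOURCE A (Python) =====
-- from itertools import groupby
--
-- def remove_pos_tags(tagged_docs):
--     new_tagged_docs = []
--     for doc in tagged_docs:
--         groups = groupby(doc, key=lambda x: x[1])  # group by tags
--         entities = [[t for t, _ in tokens if t != '’'] for tag, tokens in groups if tag == 'NNP']  # named entities
--         entities = [('_'.join(entity), 'NNP') for entity in entities if len(entity) == 2]
--         lists = [(token, tag) for (token, tag) in doc if tag != 'NNP'] + entities
--         new_tagged_docs.append(lists)
--     remove_list = ['CC', 'CD', 'DT', 'IN', 'MD', 'POS', 'PRP', 'PRP$', 'RP', 'TO', 'VB', 'VBD', 'VBG', 'VBN', 'VBP',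
--                    'VBZ', 'WDT', 'WP', 'WP$', 'WRB']
--     new_tagged_docs = [[token for (token, tag) in doc if tag not in remove_list] for doc in new_tagged_docs]
--     return new_tagged_docs
-- ===== SOURCE B (Python) =====
-- _REMOVE = {'CC', 'CD', 'DT', 'IN', 'MD', 'POS', 'PRP', 'PRP$', 'RP', 'TO', 'VB', 'VBD',
--            'VBG', 'VBN', 'VBP', 'VBZ', 'WDT', 'WP', 'WP$', 'WRB'}
--
-- def remove_pos_tags(tagged_docs):
--     result = []
--     for doc in tagged_docs:
--         main, entities, run = [], [], []
--         for token, tag in doc: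
--             if tag == 'NNP':
--                 if token != '\u2019':
--                     run.append(token)
--             else:
--                 if len(run) == 2:
--                     entities.append('_'.join(run))
--                 run = []
--                 if tag not in _REMOVE:
--                     main.append(token)
--         if len(run) == 2:
--             entities.append('_'.join(run))
--         result.append(main + entities)
--     return result
-- ===== Notes on version B (the rewrite author's own statement) =====
-- stated objective: simpler
-- what changed: Replaces itertools.groupby plus three per-document list comprehensions and a second tag-filtering pass with one explicit single-pass loop per document that tracks the current consecutive-NNP run, emits stripped two-token runs as entities, and filters removable tags on the fly (set membership, one traversal).
import Mathlib
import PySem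

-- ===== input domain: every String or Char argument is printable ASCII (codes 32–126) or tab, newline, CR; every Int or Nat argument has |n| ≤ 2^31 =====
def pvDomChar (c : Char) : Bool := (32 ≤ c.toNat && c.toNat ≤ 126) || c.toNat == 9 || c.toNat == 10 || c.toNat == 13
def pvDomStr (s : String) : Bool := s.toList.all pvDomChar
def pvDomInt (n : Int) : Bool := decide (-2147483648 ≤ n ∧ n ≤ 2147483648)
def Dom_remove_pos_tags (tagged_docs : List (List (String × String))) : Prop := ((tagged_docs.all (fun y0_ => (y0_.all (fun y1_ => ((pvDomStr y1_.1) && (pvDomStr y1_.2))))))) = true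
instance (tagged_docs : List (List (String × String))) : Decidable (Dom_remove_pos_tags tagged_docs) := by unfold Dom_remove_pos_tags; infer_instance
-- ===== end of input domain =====

-- B replaces groupby + three list comprehensions per document by one explicit loop that
-- tracks the current consecutive-NNP run and filters tags on the fly (objective: simpler).

-- ===== PORT A =====
-- itertools.groupby(doc, key=lambda x: x[1]) as a list of (key, group) pairs
def pvGroupby : List (String × String) → List (String × List (String × String))
  | [] => []
  | (t, g) :: rest =>
      (g, (t, g) :: rest.takeWhile (fun p => p.2 == g)) ::
        pvGroupby (rest.dropWhile (fun p => p.2 == g))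
  termination_by l => l.length
  decreasing_by
    simp only [List.length_cons]
    exact Nat.lt_succ_of_le (List.length_dropWhile_le _ _)

def pvRemoveList : List String :=
  ["CC", "CD", "DT", "IN", "MD", "POS", "PRP", "PRP$", "RP", "TO", "VB", "VBD",
   "VBG", "VBN", "VBP", "VBZ", "WDT", "WP", "WP$", "WRB"]

def remove_pos_tags (tagged_docs : List (List (String × String))) : List (List String) :=
  let new_tagged_docs := tagged_docs.map (fun doc =>
    let groups := pvGroupby doc
    let entities := (groups.filter (fun gp => gp.1 == "NNP")).map
      (fun gp => (gp.2.filter (fun p => p.1 != "’")).map (fun p => p.1))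
    let entities2 := (entities.filter (fun e => e.length == 2)).map
      (fun e => (PySem.Str.join "_" e, "NNP"))
    (doc.filter (fun p => p.2 != "NNP")) ++ entities2)
  new_tagged_docs.map (fun doc =>
    (doc.filter (fun p => !pvRemoveList.contains p.2)).map (fun p => p.1))

-- ===== PORT B =====
def pvRemoveSet : PySem.Set String :=
  PySem.Set.ofList ["CC", "CD", "DT", "IN", "MD", "POS", "PRP", "PRP$", "RP", "TO", "VB",
                    "VBD", "VBG", "VBN", "VBP", "VBZ", "WDT", "WP", "WP$", "WRB"]

-- the per-document loop of Source B: state (main, entities, run)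
def pvLoop : List String → List String → List String → List (String × String) → List String
  | main, ents, run, [] =>
      main ++ (if run.length == 2 then ents ++ [PySem.Str.join "_" run] else ents)
  | main, ents, run, (t, g) :: rest =>
      if g == "NNP" then
        pvLoop main ents (if t != "’" then run ++ [t] else run) rest
      else
        pvLoop (if pvRemoveSet.contains g then main else main ++ [t])
          (if run.length == 2 then ents ++ [PySem.Str.join "_" run] else ents) [] rest

def remove_pos_tags_alt (tagged_docs : List (List (String × String))) : List (List String) :=
  tagged_docs.map (fun doc => pvLoop [] [] [] doc)

-- ===== PRECONDITION & SPEC =====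
def Spec_remove_pos_tags (tagged_docs : List (List (String × String))) (out : List (List String)) : Prop := out = remove_pos_tags_alt tagged_docs
instance (tagged_docs : List (List (String × String))) (out : List (List String)) : Decidable (Spec_remove_pos_tags tagged_docs out) := by unfold Spec_remove_pos_tags; infer_instance

-- ===== CLAIM (what is proved, stated in full; the proofs are below) =====
def Claim_equal_remove_pos_tags : Prop := ∀ (tagged_docs : List (List (String × String))), Dom_remove_pos_tags tagged_docs → Spec_remove_pos_tags tagged_docs (remove_pos_tags tagged_docs)

-- ===== LEMMAS AND PROOFS =====

-- finalize a (already '’'-filtered) NNP run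
def pvFinal (run : List String) : List String :=
  if run.length == 2 then [PySem.Str.join "_" run] else []

-- what the B loop contributes to the main list
def pvBmain : List (String × String) → List String
  | [] => []
  | (t, g) :: rest =>
      if g == "NNP" then pvBmain rest
      else (if pvRemoveSet.contains g then [] else [t]) ++ pvBmain rest

-- what the B loop contributes to the entities list, starting from a pending run
def pvBents : List String → List (String × String) → List String
  | run, [] => pvFinal run
  | run, (t, g) :: rest =>
      if g == "NNP" then pvBents (if t != "’" then run ++ [t] else run) rest
      else pvFinal run ++ pvBents [] rest

-- A's entity tokens, as a function of the group list
def pvEntsOf (gs : List (String × List (String × String))) : List String :=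
  (((gs.filter (fun gp => gp.1 == "NNP")).map
      (fun gp => (gp.2.filter (fun p => p.1 != "’")).map (fun p => p.1))).filter
    (fun e => e.length == 2)).map (PySem.Str.join "_")

def pvAents (doc : List (String × String)) : List String := pvEntsOf (pvGroupby doc)

def pvNnpTake (doc : List (String × String)) : List String :=
  ((doc.takeWhile (fun p => p.2 == "NNP")).filter (fun p => p.1 != "’")).map (fun p => p.1)

def pvNnpDrop (doc : List (String × String)) : List (String × String) :=
  doc.dropWhile (fun p => p.2 == "NNP")

theorem pvLoop_eq (doc : List (String × String)) :
    ∀ main ents run, pvLoop main ents run doc = main ++ pvBmain doc ++ (ents ++ pvBents run doc) := by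
  induction doc with
  | nil =>
      intro main ents run
      simp only [pvLoop, pvBmain, pvBents, pvFinal, List.append_nil]
      split <;> simp
  | cons p rest ih =>
      intro main ents run
      obtain ⟨t, g⟩ := p
      simp only [pvLoop, pvBmain, pvBents, pvFinal, ih]
      by_cases hg : (g == "NNP") = true
      · simp only [hg, if_true]
      · simp only [hg, Bool.false_eq_true, if_false]
        split <;> split <;> simp

theorem pvAents_cons_drop (t g : String) (hg : (g == "NNP") = false) (rest : List (String × String)) :
    pvAents ((t, g) :: rest) = pvAents (rest.dropWhile (fun p => p.2 == g)) := by
  unfold pvAents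
  rw [pvGroupby]
  simp [pvEntsOf, hg]

theorem pvAents_dropWhile (g : String) (hg : (g == "NNP") = false) (l : List (String × String)) :
    pvAents (l.dropWhile (fun p => p.2 == g)) = pvAents l := by
  induction l with
  | nil => rfl
  | cons p r ih =>
      obtain ⟨u, h⟩ := p
      rw [List.dropWhile_cons]
      by_cases hh : (h == g) = true
      · have hge : h = g := by simpa using hh
        subst hge
        simp only [hh, if_true, ih]
        rw [pvAents_cons_drop u h hg r, ih]
      · simp [hh]

theorem pvAents_cons (t g : String) (hg : (g == "NNP") = false) (rest : List (String × String)) :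
    pvAents ((t, g) :: rest) = pvAents rest := by
  rw [pvAents_cons_drop t g hg rest, pvAents_dropWhile g hg rest]

theorem pvAents_split (doc : List (String × String)) :
    pvAents doc = pvFinal (pvNnpTake doc) ++ pvAents (pvNnpDrop doc) := by
  cases doc with
  | nil => rfl
  | cons p rest =>
      obtain ⟨t, g⟩ := p
      by_cases hg : (g == "NNP") = true
      · have hge : g = "NNP" := by simpa using hg
        subst hge
        unfold pvAents pvNnpTake pvNnpDrop
        rw [pvGroupby]
        simp only [List.takeWhile_cons, List.dropWhile_cons, hg, if_true, pvEntsOf,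
          List.filter_cons, List.map_cons, pvFinal]
        split <;> split <;> simp_all
      · replace hg : (g == "NNP") = false := by simpa using hg
        simp only [pvNnpTake, pvNnpDrop, List.takeWhile_cons, List.dropWhile_cons, hg,
          Bool.false_eq_true, if_false]
        simp [pvFinal, pvAents_cons t g hg rest]

theorem pvBents_eq (doc : List (String × String)) :
    ∀ run, pvBents run doc = pvFinal (run ++ pvNnpTake doc) ++ pvAents (pvNnpDrop doc) := by
  induction doc with
  | nil => intro run; simp [pvBents, pvNnpTake, pvNnpDrop, pvAents, pvEntsOf, pvGroupby]
  | cons p rest ih =>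
      intro run
      obtain ⟨t, g⟩ := p
      by_cases hg : (g == "NNP") = true
      · simp only [pvBents, hg, if_true, ih, pvNnpTake, pvNnpDrop, List.takeWhile_cons,
          List.dropWhile_cons]
        split <;> simp_all [List.append_assoc]
      · replace hg : (g == "NNP") = false := by simpa using hg
        simp only [pvBents, hg, Bool.false_eq_true, if_false, ih, pvNnpTake, pvNnpDrop,
          List.takeWhile_cons, List.dropWhile_cons, List.nil_append]
        rw [pvAents_cons t g hg rest, pvAents_split rest]
        simp [pvNnpTake, pvNnpDrop]

theorem pvMain_eq (doc : List (String × String)) :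
    ((doc.filter (fun p => p.2 != "NNP")).filter (fun p => !pvRemoveList.contains p.2)).map
      (fun p => p.1) = pvBmain doc := by
  induction doc with
  | nil => rfl
  | cons p rest ih =>
      obtain ⟨t, g⟩ := p
      simp only [List.filter_cons, pvBmain]
      by_cases hg : (g == "NNP") = true
      · have hge : g = "NNP" := by simpa using hg
        subst hge
        simpa [bne] using ih
      · replace hg : (g == "NNP") = false := by simpa using hg
        have hset : pvRemoveSet = pvRemoveList := by decide
        simp only [bne, hg, Bool.not_false, if_true]
        by_cases hr : g ∈ pvRemoveList <;> simp_all [bne]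

-- ===== VERDICT (by name: the statement is the Claim_ definition above) =====
theorem remove_pos_tags_spec : Claim_equal_remove_pos_tags := by
  intro tagged_docs _
  unfold Spec_remove_pos_tags remove_pos_tags remove_pos_tags_alt
  simp only [List.map_map]
  refine List.map_congr_left ?_
  intro doc _
  simp only [Function.comp]
  rw [pvLoop_eq doc [] [] []]
  rw [show pvBents [] doc = pvAents doc by
        rw [pvBents_eq doc [], List.nil_append, ← pvAents_split doc]]
  simp only [List.nil_append, List.filter_append, List.map_append]
  rw [pvMain_eq doc]
  congr 1
  have hnnp : "NNP" ∉ pvRemoveList := by decide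
  simp [List.filter_map, Function.comp, pvAents, pvEntsOf, List.map_map, hnnp]
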